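-- pv_equiv track=rewrite | github.com/dodamhaae/Algorithm | Programmers/Level-0/진료순서-정하기.py | solution
-- ===== SOURCE A (Python) =====
-- def solution(emergency):
--     cnt=1
--     answer = [0 for _ in range(len(emergency))]
--     order= sorted(emergency)[::-1]
--     for i in order:
--         for j, n in enumerate(emergency):
--             if n == i:
--                 answer[j] = cnt
--         cnt+=1
--     return answer
-- ===== SOURCE B (Python) =====
-- def solution(emergency):
--     # Rank = 1 + position of the value's last occurrence in the descending sort:
--     # one dict pass replaces A's inner scan per sorted element.
--     rank = {}
--     for pos, v in enumerate(sorted(emergency)[::-1], 1):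
--         rank[v] = pos
--     return [rank[v] for v in emergency]
-- ===== Notes on version B (the rewrite author's own statement) =====
-- stated objective: faster
-- what changed: Replaces A's per-sorted-element scan of the whole list with one dict built from the descending sort (value -> 1 + last position) and a single lookup pass.
import Mathlib
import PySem

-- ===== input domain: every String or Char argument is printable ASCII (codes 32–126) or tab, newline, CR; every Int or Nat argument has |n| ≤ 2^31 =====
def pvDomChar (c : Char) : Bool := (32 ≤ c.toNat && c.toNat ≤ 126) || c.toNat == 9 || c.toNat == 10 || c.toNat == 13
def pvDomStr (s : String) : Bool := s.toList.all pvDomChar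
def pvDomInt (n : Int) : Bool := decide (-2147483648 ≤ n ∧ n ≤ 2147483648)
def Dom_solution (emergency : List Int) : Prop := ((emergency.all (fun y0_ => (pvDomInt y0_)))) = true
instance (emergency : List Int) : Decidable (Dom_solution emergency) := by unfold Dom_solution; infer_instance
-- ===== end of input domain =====

-- B replaces A's quadratic per-sorted-element rescan by a dict (value -> 1 + last descending position) and one lookup pass.

-- ===== PORT A =====
def solution (emergency : List Int) : List Int :=
  let cnt : Int := 1
  let answer : List Int := (PySem.List.pyRange 0 (emergency.length : Int) 1).map (fun _ => (0 : Int))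
  -- sorted(emergency)[::-1]: [::-1] is reverse (PySem.List.slice?_none_none_neg_one, always some)
  let order : List Int := (PySem.List.sorted emergency (fun x => x) false).reverse
  (order.foldl (fun (st : List Int × Int) i =>
      ((PySem.List.enumerate emergency 0).foldl
          (fun ans p => if p.2 == i then ans.set p.1.toNat st.2 else ans) st.1,
        st.2 + 1)) (answer, cnt)).1

-- ===== PORT B =====
def solution_alt (emergency : List Int) : List Int :=
  let rank : PySem.Dict Int Int :=
    (PySem.List.enumerate ((PySem.List.sorted emergency (fun x => x) false).reverse) 1).foldl
      (fun d p => d.insert p.2 p.1) PySem.Dict.empty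
  -- rank[v]: v is always a key (every element occurs in the sorted list), so .getD 0 is exact
  emergency.map (fun v => (rank.get? v).getD 0)

-- ===== PRECONDITION & SPEC =====
def Spec_solution (emergency : List Int) (out : List Int) : Prop := out = solution_alt emergency
instance (emergency : List Int) (out : List Int) : Decidable (Spec_solution emergency out) := by unfold Spec_solution; infer_instance

-- ===== CLAIM (what is proved, stated in full; the proofs are below) =====
def Claim_equal_solution : Prop := ∀ (emergency : List Int), Dom_solution emergency → Spec_solution emergency (solution emergency)

-- ===== LEMMAS AND PROOFS =====

-- rank (s-based) of the LAST occurrence of v in l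
def lastRank (v : Int) : Int → List Int → Option Int
  | _, [] => none
  | s, x :: xs =>
    match lastRank v (s + 1) xs with
    | some r => some r
    | none => if x = v then some s else none

theorem dict_fold_get (v : Int) (l : List Int) : ∀ (s : Int) (d : PySem.Dict Int Int),
    ((PySem.List.enumerate l s).foldl (fun d p => d.insert p.2 p.1) d).get? v
      = (match lastRank v s l with
         | some r => some r
         | none => d.get? v) := by
  induction l with
  | nil => intro s d; simp [PySem.List.enumerate_nil, lastRank]
  | cons x xs ih =>
    intro s d
    rw [PySem.List.enumerate_cons, List.foldl_cons, ih]
    simp only [lastRank]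
    cases lastRank v (s + 1) xs with
    | some r => simp
    | none =>
      simp only
      by_cases h : x = v
      · subst h; simp [PySem.Dict.get?_insert_self]
      · rw [PySem.Dict.get?_insert_of_ne _ _ (fun hvx => h hvx.symm)]
        simp [h]

theorem inner_fold (i c : Int) (em : List Int) : ∀ (pre rest : List Int), rest.length = em.length →
    (PySem.List.enumerate em (pre.length : Int)).foldl
        (fun ans p => if p.2 == i then ans.set p.1.toNat c else ans) (pre ++ rest)
      = pre ++ List.zipWith (fun n a => if n = i then c else a) em rest := by
  induction em with
  | nil =>
    intro pre rest hlen
    simp [PySem.List.enumerate_nil, List.length_eq_zero_iff.mp hlen]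
  | cons x em ih =>
    intro pre rest hlen
    cases rest with
    | nil => simp at hlen
    | cons r rest =>
      rw [PySem.List.enumerate_cons, List.foldl_cons]
      have hstep : (if (x == i) then (pre ++ r :: rest).set ((pre.length : Int)).toNat c
                    else pre ++ r :: rest)
          = (pre ++ [if x = i then c else r]) ++ rest := by
        by_cases h : x = i
        · simp [h, Int.toNat_natCast]
        · simp [h]
      have hcast : (pre.length : Int) + 1 = (((pre ++ [if x = i then c else r]).length : Nat) : Int) := by
        simp
      rw [hstep, hcast, ih (pre ++ [if x = i then c else r]) rest (by simpa using hlen)]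
      simp [List.zipWith]

theorem zipWith_self_right (f : Int → Int → Int) (hf : ∀ n a, f n a = a) :
    ∀ (em ans : List Int), ans.length = em.length → List.zipWith f em ans = ans := by
  intro em
  induction em with
  | nil => intro ans h; simp [List.length_eq_zero_iff.mp h]
  | cons x em ih =>
    intro ans h
    cases ans with
    | nil => simp at h
    | cons a ans => simp [List.zipWith, hf, ih ans (by simpa using h)]

theorem zipWith_zipWith_same (f g : Int → Int → Int) :
    ∀ (em ans : List Int),
      List.zipWith f em (List.zipWith g em ans) = List.zipWith (fun n a => f n (g n a)) em ans := by
  intro em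
  induction em with
  | nil => intro ans; simp
  | cons x em ih =>
    intro ans
    cases ans with
    | nil => simp
    | cons a ans => simp [List.zipWith, ih]

theorem outer_fold (em : List Int) (l : List Int) : ∀ (c : Int) (ans : List Int), ans.length = em.length →
    (l.foldl (fun (st : List Int × Int) i =>
        ((PySem.List.enumerate em 0).foldl
            (fun ans p => if p.2 == i then ans.set p.1.toNat st.2 else ans) st.1,
          st.2 + 1)) (ans, c)).1
      = List.zipWith (fun n a => (lastRank n c l).getD a) em ans := by
  induction l with
  | nil =>
    intro c ans hlen
    simp only [List.foldl_nil]
    exact (zipWith_self_right _ (fun n a => by simp [lastRank]) em ans hlen).symm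
  | cons i l ih =>
    intro c ans hlen
    rw [List.foldl_cons]
    have h0 : (0 : Int) = ((([] : List Int).length : Nat) : Int) := by simp
    have hinner := inner_fold i c em [] ans hlen
    simp only [List.nil_append] at hinner
    rw [show (PySem.List.enumerate em 0).foldl
          (fun ans p => if p.2 == i then ans.set p.1.toNat c else ans) ans
        = List.zipWith (fun n a => if n = i then c else a) em ans from by
          rw [h0]; exact hinner]
    rw [ih (c + 1) _ (by simp [hlen])]
    rw [zipWith_zipWith_same]
    have hfun : (fun (n a : Int) => (lastRank n (c + 1) l).getD (if n = i then c else a))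
        = (fun (n a : Int) => (lastRank n c (i :: l)).getD a) := by
      funext n a
      simp only [lastRank]
      cases hr : lastRank n (c + 1) l with
      | some r => simp
      | none =>
        by_cases h : i = n
        · simp [h]
        · have hni : ¬ n = i := fun e => h e.symm
          simp [h, hni]
    rw [hfun]

theorem map_const_zero (l : List Int) : l.map (fun _ => (0 : Int)) = List.replicate l.length 0 := by
  induction l with
  | nil => simp
  | cons x l ih => simp [ih, List.replicate_succ]

theorem zipWith_replicate_zero (f : Int → Int → Int) :
    ∀ (em : List Int), List.zipWith f em (List.replicate em.length 0) = em.map (fun n => f n 0) := by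
  intro em
  induction em with
  | nil => simp
  | cons x em ih => simp [List.replicate_succ, ih]

-- ===== VERDICT (by name: the statement is the Claim_ definition above) =====
theorem solution_spec : Claim_equal_solution := by
  intro emergency _hdom
  unfold Spec_solution solution solution_alt
  simp only
  have hplen : (PySem.List.pyRange 0 (emergency.length : Int) 1).length = emergency.length := by
    simp [PySem.List.length_pyRange_one]
  have hzlen : ((PySem.List.pyRange 0 (emergency.length : Int) 1).map (fun _ => (0 : Int))).length
      = emergency.length := by simp [hplen]
  rw [outer_fold emergency _ 1 _ hzlen]
  rw [map_const_zero, hplen, zipWith_replicate_zero]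
  apply List.map_congr_left
  intro v _hv
  rw [dict_fold_get v _ 1 PySem.Dict.empty]
  cases lastRank v 1 ((PySem.List.sorted emergency (fun x => x) false).reverse) with
  | some r => simp
  | none => simp [PySem.Dict.get?_empty]
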